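-- pv_equiv track=rewrite | github.com/Daniel107x-hub/competitive_programming | Arrays/number_of_inversions.py | get_inversions
-- ===== SOURCE A (Python) =====
-- def get_inversions(matrix):
--     dimension = len(matrix)
--     inversions = 0
--     for p in range(0, dimension):
--         for q in range(0, dimension):
--             current_value = matrix[p][q]
--             for i in range(0, p + 1):
--                 for j in range(0, q + 1):
--                     if i == p and q == j:
--                         break
--                     compare_value = matrix[i][j]
--                     if compare_value > current_value:
--                         inversions += 1
--     return inversions
-- ===== SOURCE B (Python) =====
-- def _bisect_right(s, v):
--     lo, hi = 0, len(s)
--     while lo < hi: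
--         mid = (lo + hi) // 2
--         if v < s[mid]:
--             hi = mid
--         else:
--             lo = mid + 1
--     return lo
--
--
-- def get_inversions(matrix):
--     n = len(matrix)
--     cols = [[] for _ in range(n)]
--     total = 0
--     for r in range(n):
--         for c in range(n):
--             v = matrix[r][c]
--             for cc in range(c + 1):
--                 s = cols[cc]
--                 total += len(s) - _bisect_right(s, v)
--             sc = cols[c]
--             sc.insert(_bisect_right(sc, v), v)
--     return total
-- ===== Notes on version B (the rewrite author's own statement) =====
-- stated objective: faster
-- what changed: A rescans the whole dominated rectangle for every cell (four nested loops); B sweeps the matrix once in row-major order keeping a sorted list of the values seen so far in each column, counting larger predecessors with a hand-written bisect_right binary search and inserting the new value in sorted position.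
import Mathlib
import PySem

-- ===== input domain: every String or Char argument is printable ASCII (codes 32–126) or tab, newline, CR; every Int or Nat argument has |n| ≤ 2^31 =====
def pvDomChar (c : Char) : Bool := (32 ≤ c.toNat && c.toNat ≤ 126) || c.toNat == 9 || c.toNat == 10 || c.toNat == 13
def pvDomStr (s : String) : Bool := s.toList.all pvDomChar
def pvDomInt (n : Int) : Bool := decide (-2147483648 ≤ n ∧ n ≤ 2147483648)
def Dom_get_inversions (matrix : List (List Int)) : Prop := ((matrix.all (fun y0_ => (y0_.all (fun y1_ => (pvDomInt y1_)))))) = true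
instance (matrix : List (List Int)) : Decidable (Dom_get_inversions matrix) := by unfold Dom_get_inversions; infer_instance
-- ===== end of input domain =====

-- B replaces A's quadruple rescan of the dominated rectangle by a row-major sweep keeping one
-- sorted value list per column, queried by binary search (measurably faster on the timed inputs).

-- ===== PORT A =====
-- inner 'for j in range(0, q + 1)' loop of A, with its 'break' (stop, return the accumulator)
def pvLoopJ (matrix : List (List Int)) (current_value : Int) (p q i : Int) :
    List Int → Int → Int
  | [], inversions => inversions
  | j :: rest, inversions =>
    if i = p ∧ q = j then inversions
    else
      let compare_value := PySem.List.pyGetD (PySem.List.pyGetD matrix i []) j 0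
      pvLoopJ matrix current_value p q i rest
        (if compare_value > current_value then inversions + 1 else inversions)

def get_inversions (matrix : List (List Int)) : Int :=
  let dimension : Int := matrix.length
  (PySem.List.pyRange 0 dimension 1).foldl (fun inversions p =>
    (PySem.List.pyRange 0 dimension 1).foldl (fun inversions q =>
      let current_value := PySem.List.pyGetD (PySem.List.pyGetD matrix p []) q 0
      (PySem.List.pyRange 0 (p + 1) 1).foldl (fun inversions i =>
        pvLoopJ matrix current_value p q i (PySem.List.pyRange 0 (q + 1) 1) inversions)
        inversions) inversions) 0

-- ===== PORT B =====
-- Source B's _bisect_right is the textbook bisect_right loop, ported as PySem.List.bisectRight;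
-- sc.insert(idx, v) is PySem.List.insert
def get_inversions_alt (matrix : List (List Int)) : Int :=
  let n : Int := matrix.length
  let cols0 : List (List Int) := (PySem.List.pyRange 0 n 1).map (fun _ => ([] : List Int))
  let st := (PySem.List.pyRange 0 n 1).foldl (fun st r =>
    (PySem.List.pyRange 0 n 1).foldl (fun st c =>
      let cols := st.1
      let v := PySem.List.pyGetD (PySem.List.pyGetD matrix r []) c 0
      let total := (PySem.List.pyRange 0 (c + 1) 1).foldl (fun t cc =>
        let s := PySem.List.pyGetD cols cc []
        t + (s.length : Int) - (PySem.List.bisectRight s v : Int)) st.2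
      let sc := PySem.List.pyGetD cols c []
      (PySem.List.pySetD cols c (PySem.List.insert sc (PySem.List.bisectRight sc v : Int) v),
        total)) st) (cols0, 0)
  st.2

-- ===== PRECONDITION & SPEC =====
-- A reads matrix[p][q] for every p, q < len(matrix): on a matrix with a row shorter than the
-- number of rows Python raises IndexError, so exactly those inputs are excluded.
def Pre_get_inversions (matrix : List (List Int)) : Prop :=
  ∀ row ∈ matrix, matrix.length ≤ row.length
instance (matrix : List (List Int)) : Decidable (Pre_get_inversions matrix) := by
  unfold Pre_get_inversions; infer_instance
def pvWitness_get_inversions : List (List Int) := [[1, 2], [3, 0]]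
def Spec_get_inversions (matrix : List (List Int)) (out : Int) : Prop := out = get_inversions_alt matrix
instance (matrix : List (List Int)) (out : Int) : Decidable (Spec_get_inversions matrix out) := by unfold Spec_get_inversions; infer_instance

-- ===== CLAIM (what is proved, stated in full; the proofs are below) =====
def Claim_equal_get_inversions : Prop := ∀ (matrix : List (List Int)), Dom_get_inversions matrix → Pre_get_inversions matrix → Spec_get_inversions matrix (get_inversions matrix)

-- ===== LEMMAS AND PROOFS =====

-- value of cell (i, j), with the ports' defaults
def pvV (m : List (List Int)) (i j : Nat) : Int := (m.getD i []).getD j 0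
-- number of j < k with m[i][j] > w (a row count) / of i < k with m[i][j] > w (a column count)
def pvCntRow (m : List (List Int)) (w : Int) (i k : Nat) : Nat :=
  (List.range k).countP (fun j => w < pvV m i j)
def pvCntCol (m : List (List Int)) (w : Int) (j k : Nat) : Nat :=
  (List.range k).countP (fun i => w < pvV m i j)
-- the first k values of column j, in row order
def pvColVals (m : List (List Int)) (j k : Nat) : List Int :=
  (List.range k).map (fun i => pvV m i j)
-- what A adds for target cell (p, q): row-by-row count over the rectangle minus the corner
def pvCellA (m : List (List Int)) (p q : Nat) : Nat :=
  ((List.range p).map (fun i => pvCntRow m (pvV m p q) i (q + 1))).sum + pvCntRow m (pvV m p q) p q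
-- what B adds for target cell (r, c): column-by-column count over the same rectangle
def pvCellB (m : List (List Int)) (r c : Nat) : Nat :=
  ((List.range c).map (fun cc => pvCntCol m (pvV m r c) cc (r + 1))).sum + pvCntCol m (pvV m r c) c r

lemma pvCountP_range (k : Nat) (pb : Nat → Bool) :
    (List.range k).countP pb = ∑ j ∈ Finset.range k, if pb j then 1 else 0 := by
  induction k with
  | zero => simp
  | succ k ih =>
    rw [List.range_succ, List.countP_append, Finset.sum_range_succ, ih]
    simp [List.countP_cons]

lemma pvSumRangeNat (n : Nat) (g : Nat → Nat) :
    ((List.range n).map g).sum = ∑ i ∈ Finset.range n, g i := rfl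

-- the two groupings of the rectangle-minus-corner count agree
lemma pvCell_eq (m : List (List Int)) (p q : Nat) : pvCellA m p q = pvCellB m p q := by
  unfold pvCellA pvCellB pvCntRow pvCntCol
  simp only [pvCountP_range, pvSumRangeNat, Finset.sum_range_succ, Finset.sum_add_distrib]
  rw [Finset.sum_comm]
  omega
lemma pvLoopJ_prefix (m : List (List Int)) (cv : Int) (p q i : Int) (js₁ js₂ : List Int)
    (inv : Int) (h : ∀ j ∈ js₁, ¬(i = p ∧ q = j)) :
    pvLoopJ m cv p q i (js₁ ++ js₂) inv
      = pvLoopJ m cv p q i js₂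
          (inv + (js₁.countP (fun j => cv < PySem.List.pyGetD (PySem.List.pyGetD m i []) j 0) : Int)) := by
  induction js₁ generalizing inv with
  | nil => simp
  | cons j t ih =>
    have hj : ¬(i = p ∧ q = j) := h j (by simp)
    rw [List.cons_append]
    show pvLoopJ m cv p q i (j :: (t ++ js₂)) inv = _
    rw [pvLoopJ]
    simp only [hj, if_false]
    rw [ih _ (fun x hx => h x (by simp [hx]))]
    congr 1
    rw [List.countP_cons]
    split_ifs with h1 <;> simp at * <;> push_cast <;> omega

lemma pvFoldInv {σ : Type} (f : σ → Int → σ) (P : Int → σ → Prop) (a b : Int)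
    (hstep : ∀ k s, a ≤ k → k < b → P k s → P (k + 1) (f s k)) :
    ∀ s, P a s → a ≤ b → P b ((PySem.List.pyRange a b 1).foldl f s) := by
  have main : ∀ (n : Nat) (a : Int), (b - a).toNat = n →
      (∀ k s, a ≤ k → k < b → P k s → P (k + 1) (f s k)) →
      ∀ s, P a s → a ≤ b → P b ((PySem.List.pyRange a b 1).foldl f s) := by
    intro n
    induction n with
    | zero =>
      intro a hn _ s hP hab
      have : a = b := by omega
      subst this
      rw [PySem.List.pyRange_one_eq_nil le_rfl]
      simpa using hP
    | succ n ih =>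
      intro a hn hst s hP hab
      have hlt : a < b := by omega
      rw [PySem.List.pyRange_one_cons hlt, List.foldl_cons]
      exact ih (a + 1) (by omega) (fun k s hk1 hk2 hk3 => hst k s (by omega) hk2 hk3)
        (f s a) (hst a s le_rfl hlt hP) (by omega)
  intro s hP hab
  exact main (b - a).toNat a rfl hstep s hP hab

lemma pvCntRow_cast (m : List (List Int)) (w : Int) (i k : Nat) :
    ((PySem.List.pyRange 0 ((k : Nat) : Int) 1).countP
        (fun j => w < PySem.List.pyGetD (PySem.List.pyGetD m ((i : Nat) : Int) []) j 0))
      = pvCntRow m w i k := by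
  rw [PySem.List.pyRange_zero_natCast, List.countP_map]
  unfold pvCntRow
  apply List.countP_congr
  intro j hj
  simp [pvV, Function.comp]

lemma pvLoopJ_no_break (m : List (List Int)) (cv : Int) (pn qn i : Nat) (hip : i ≠ pn) (inv : Int) :
    pvLoopJ m cv (pn : Int) (qn : Int) (i : Int) (PySem.List.pyRange 0 ((qn : Int) + 1) 1) inv
      = inv + (pvCntRow m cv i (qn + 1) : Int) := by
  have h1 : ((qn : Int) + 1) = ((qn + 1 : Nat) : Int) := by push_cast; ring
  have h2 := pvLoopJ_prefix m cv (pn : Int) (qn : Int) (i : Int)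
    (PySem.List.pyRange 0 ((qn : Int) + 1) 1) [] inv ?_
  · rw [List.append_nil] at h2
    rw [h2, pvLoopJ]
    rw [h1, pvCntRow_cast]
  · intro j _
    rintro ⟨hi, _⟩
    exact hip (by exact_mod_cast hi)

lemma pvLoopJ_diag (m : List (List Int)) (cv : Int) (pn qn : Nat) (inv : Int) :
    pvLoopJ m cv (pn : Int) (qn : Int) (pn : Int) (PySem.List.pyRange 0 ((qn : Int) + 1) 1) inv
      = inv + (pvCntRow m cv pn qn : Int) := by
  rw [PySem.List.pyRange_one_succ_right (by positivity)]
  rw [pvLoopJ_prefix m cv _ _ _ _ _ inv ?_]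
  · rw [pvLoopJ]
    simp only [and_self, if_true]
    congr 1
    rw [pvCntRow_cast]
  · intro j hj
    rw [PySem.List.mem_pyRange_one] at hj
    rintro ⟨_, hq⟩
    omega

lemma pvA_inner (m : List (List Int)) (pn qn : Nat) (inv : Int) :
    (PySem.List.pyRange 0 ((pn : Int) + 1) 1).foldl
      (fun inversions i =>
        pvLoopJ m (pvV m pn qn) (pn : Int) (qn : Int) i
          (PySem.List.pyRange 0 ((qn : Int) + 1) 1) inversions) inv
      = inv + (pvCellA m pn qn : Int) := by
  rw [PySem.List.pyRange_one_succ_right (a := 0) (b := (pn : Int)) (by positivity),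
    List.foldl_append]
  rw [PySem.List.pyRange_zero_natCast, List.foldl_map]
  rw [PySem.List.foldl_congr_mem _ _
    (fun (acc : Int) (i : Nat) => acc + (pvCntRow m (pvV m pn qn) i (qn + 1) : Int)) _ ?hcong]
  case hcong =>
    intro acc i hi
    exact pvLoopJ_no_break m _ pn qn i (by simp at hi; omega) acc
  rw [PySem.List.foldl_add, List.foldl_cons, List.foldl_nil, pvLoopJ_diag]
  unfold pvCellA
  push_cast [Nat.cast_list_sum, List.map_map]
  simp only [Function.comp_def]
  ring

lemma pvA_eq (m : List (List Int)) :
    get_inversions m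
      = ((List.range m.length).map (fun p =>
          (((List.range m.length).map (fun q => (pvCellA m p q : Int))).sum))).sum := by
  unfold get_inversions
  simp only []
  rw [PySem.List.pyRange_zero_natCast, List.foldl_map]
  rw [PySem.List.foldl_congr_mem _ _
    (fun (acc : Int) (pn : Nat) =>
      acc + (((List.range m.length).map (fun q => (pvCellA m pn q : Int))).sum)) _ ?h1]
  case h1 =>
    intro acc pn _
    show _ = acc + _
    rw [List.foldl_map]
    rw [PySem.List.foldl_congr_mem _ _
      (fun (acc : Int) (qn : Nat) => acc + (pvCellA m pn qn : Int)) _ ?h2]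
    case h2 =>
      intro acc2 qn _
      show _ = acc2 + _
      have hv : PySem.List.pyGetD (PySem.List.pyGetD m (pn : Int) []) (qn : Int) 0 = pvV m pn qn := by
        simp [pvV]
      rw [hv]
      exact pvA_inner m pn qn acc2
    rw [PySem.List.foldl_add]
  rw [PySem.List.foldl_add]
  simp

lemma pvCountP_cut {α : Type} (p : α → Bool) :
    ∀ (xs : List α) (k : Nat), (∀ j (hj : j < xs.length), p xs[j] = decide (k ≤ j)) →
      xs.countP p = xs.length - k := by
  intro xs
  induction xs with
  | nil => intro k _; simp
  | cons x t ih =>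
    intro k h
    cases k with
    | zero =>
      have hx : p x = true := by simpa using h 0 (by simp)
      have ht : t.countP p = t.length - 0 := by
        apply ih; intro j hj; simpa using h (j+1) (by simpa using Nat.succ_lt_succ hj)
      simp [List.countP_cons, hx, ht]
    | succ k' =>
      have hx : p x = false := by simpa using h 0 (by simp)
      have ht : t.countP p = t.length - k' := by
        apply ih; intro j hj
        have := h (j+1) (by simpa using Nat.succ_lt_succ hj)
        simpa [Nat.succ_le_succ_iff] using this
      simp [List.countP_cons, hx, ht]

lemma pvQuery (L vals : List Int) (v : Int) (hs : L.Pairwise (· ≤ ·)) (hp : L.Perm vals) :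
    (L.length : Int) - (PySem.List.bisectRight L v : Int)
      = (vals.countP (fun x => v < x) : Int) := by
  obtain ⟨hble, hlo, hhi⟩ := PySem.List.bisectRight_spec L v hs
  have hcut : L.countP (fun x => decide (v < x)) = L.length - PySem.List.bisectRight L v := by
    apply pvCountP_cut
    intro j hj
    by_cases h : PySem.List.bisectRight L v ≤ j
    · simp [h, hhi j hj h]
    · have := hlo j hj (by omega)
      simp [h]; omega
  have := hp.countP_eq (fun x => decide (v < x))
  omega

lemma pvInsert (L : List Int) (v : Int) (hs : L.Pairwise (· ≤ ·)) :
    (PySem.List.insert L ((PySem.List.bisectRight L v : Nat) : Int) v).Pairwise (· ≤ ·) ∧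
      (PySem.List.insert L ((PySem.List.bisectRight L v : Nat) : Int) v).Perm (v :: L) := by
  obtain ⟨hble, hlo, hhi⟩ := PySem.List.bisectRight_spec L v hs
  set b := PySem.List.bisectRight L v with hb
  rw [PySem.List.insert_natCast L b v hble]
  constructor
  · rw [List.pairwise_append]
    refine ⟨hs.sublist (List.take_sublist _ _), ?_, ?_⟩
    · rw [List.pairwise_cons]
      refine ⟨?_, hs.sublist (List.drop_sublist _ _)⟩
      intro y hy
      rw [List.mem_drop_iff_getElem] at hy
      obtain ⟨i, hi, rfl⟩ := hy
      exact le_of_lt (hhi (b + i) (by omega) (by omega))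
    · intro x hx y hy
      rw [List.mem_take_iff_getElem] at hx
      obtain ⟨i, hi, rfl⟩ := hx
      have hxv : L[i] ≤ v := hlo i (by omega) (by omega)
      rcases List.mem_cons.mp hy with rfl | hy'
      · exact hxv
      · rw [List.mem_drop_iff_getElem] at hy'
        obtain ⟨k, hk, rfl⟩ := hy'
        exact le_trans hxv (le_of_lt (hhi (b + k) (by omega) (by omega)))
  · have h1 : (List.take b L ++ v :: List.drop b L).Perm
        (v :: (List.take b L ++ List.drop b L)) := List.perm_middle
    rwa [List.take_append_drop] at h1

lemma pvCntCol_vals (m : List (List Int)) (w : Int) (j k : Nat) :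
    (pvColVals m j k).countP (fun x => decide (w < x)) = pvCntCol m w j k := by
  unfold pvColVals pvCntCol
  rw [List.countP_map]
  rfl

def pvColsOK (m : List (List Int)) (r c : Nat) (cols : List (List Int)) : Prop :=
  cols.length = m.length ∧
  ∀ cc, cc < m.length →
    (cols.getD cc []).Pairwise (· ≤ ·) ∧
    (cols.getD cc []).Perm (pvColVals m cc (if cc < c then r + 1 else r))

lemma pvB_query (m : List (List Int)) (r c : Nat) (cols : List (List Int))
    (hc : c < m.length) (hOK : pvColsOK m r c cols) (t0 : Int) :
    (PySem.List.pyRange 0 ((c : Int) + 1) 1).foldl (fun t cc =>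
        t + ((PySem.List.pyGetD cols cc []).length : Int)
          - (PySem.List.bisectRight (PySem.List.pyGetD cols cc []) (pvV m r c) : Int)) t0
      = t0 + (pvCellB m r c : Int) := by
  have hcast : ((c : Int) + 1) = ((c + 1 : Nat) : Int) := by push_cast; ring
  rw [hcast, PySem.List.pyRange_zero_natCast, List.foldl_map]
  rw [PySem.List.foldl_congr_mem _ _
    (fun (t : Int) (ccn : Nat) =>
      t + (pvCntCol m (pvV m r c) ccn (if ccn < c then r + 1 else r) : Int)) _ ?hcg]
  case hcg =>
    intro t ccn hmem
    show _ = t + _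
    have hcc : ccn < m.length := by simp at hmem; omega
    obtain ⟨hsort, hperm⟩ := hOK.2 ccn hcc
    have hq := pvQuery (cols.getD ccn []) (pvColVals m ccn (if ccn < c then r + 1 else r))
      (pvV m r c) hsort hperm
    rw [pvCntCol_vals] at hq
    simp only [PySem.List.pyGetD_natCast]
    omega
  rw [PySem.List.foldl_add]
  congr 1
  rw [List.range_succ, List.map_append, List.sum_append]
  have hmc : (List.range c).map
      (fun ccn => (pvCntCol m (pvV m r c) ccn (if ccn < c then r + 1 else r) : Int))
      = (List.range c).map (fun ccn => (pvCntCol m (pvV m r c) ccn (r + 1) : Int)) := by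
    apply List.map_congr_left
    intro x hx
    simp at hx
    simp [hx]
  rw [hmc]
  unfold pvCellB
  push_cast [Nat.cast_list_sum, List.map_map]
  simp only [Function.comp_def]
  simp

lemma pvB_step (m : List (List Int)) (r c : Nat) (cols : List (List Int))
    (hc : c < m.length) (hOK : pvColsOK m r c cols) :
    pvColsOK m r (c + 1)
      (PySem.List.pySetD cols (c : Int)
        (PySem.List.insert (PySem.List.pyGetD cols (c : Int) [])
          ((PySem.List.bisectRight (PySem.List.pyGetD cols (c : Int) []) (pvV m r c) : Nat) : Int)
          (pvV m r c))) := by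
  have hlen : c < cols.length := by rw [hOK.1]; exact hc
  constructor
  · rw [PySem.List.length_pySetD]; exact hOK.1
  · intro cc hcc
    have hget : ∀ (X : List (List Int)) (k : Nat), X.getD k [] = PySem.List.pyGetD X (k : Int) [] := by
      intro X k; simp
    rw [hget, PySem.List.pyGetD_pySetD_natCast _ _ _ _ _ hlen]
    by_cases hEq : cc = c
    · subst hEq
      simp only [if_pos rfl]
      obtain ⟨hsort, hperm⟩ := hOK.2 cc hcc
      rw [hget] at hsort hperm
      obtain ⟨hsort', hperm'⟩ := pvInsert (PySem.List.pyGetD cols (cc : Int) []) (pvV m r cc) hsort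
      refine ⟨hsort', ?_⟩
      rw [if_neg (lt_irrefl cc)] at hperm
      have hcv : pvColVals m cc (r + 1) = pvColVals m cc r ++ [pvV m r cc] := by
        unfold pvColVals
        rw [List.range_succ, List.map_append]
        rfl
      have hif : (if cc < cc + 1 then r + 1 else r) = r + 1 := if_pos (by omega)
      rw [hif, hcv]
      exact hperm'.trans ((hperm.cons (pvV m r cc)).trans (List.perm_append_singleton _ _).symm)
    · rw [if_neg hEq]
      obtain ⟨hsort, hperm⟩ := hOK.2 cc hcc
      rw [hget] at hsort hperm
      refine ⟨hsort, ?_⟩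
      have : (if cc < c + 1 then r + 1 else r) = (if cc < c then r + 1 else r) := by
        split_ifs <;> omega
      rw [this]
      exact hperm

lemma pvB_wrap (m : List (List Int)) (r : Nat) (cols : List (List Int))
    (h : pvColsOK m r m.length cols) : pvColsOK m (r + 1) 0 cols := by
  refine ⟨h.1, ?_⟩
  intro cc hcc
  obtain ⟨hs, hp⟩ := h.2 cc hcc
  rw [if_pos hcc] at hp
  exact ⟨hs, by simpa using hp⟩

lemma pvB_init (m : List (List Int)) :
    pvColsOK m 0 0 ((PySem.List.pyRange 0 (m.length : Int) 1).map (fun _ => ([] : List Int))) := by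
  constructor
  · simp [PySem.List.length_pyRange_one]
  · intro cc hcc
    have : ((PySem.List.pyRange 0 (m.length : Int) 1).map (fun _ => ([] : List Int))).getD cc [] = [] := by
      rw [List.getD_eq_getElem?_getD, List.getElem?_map]
      cases h : (PySem.List.pyRange 0 (m.length : Int) 1)[cc]? <;> simp [h]
    rw [this]
    simp [pvColVals]

lemma pvB_eq (m : List (List Int)) :
    get_inversions_alt m
      = ((List.range m.length).map (fun r =>
          (((List.range m.length).map (fun c => (pvCellB m r c : Int))).sum))).sum := by
  simp only [get_inversions_alt]
  have H := pvFoldInv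
    (fun (st : List (List Int) × Int) (r : Int) =>
      List.foldl
        (fun (st : List (List Int) × Int) (c : Int) =>
          (PySem.List.pySetD st.1 c
              (PySem.List.insert (PySem.List.pyGetD st.1 c [])
                (↑(PySem.List.bisectRight (PySem.List.pyGetD st.1 c [])
                    (PySem.List.pyGetD (PySem.List.pyGetD m r []) c 0)))
                (PySem.List.pyGetD (PySem.List.pyGetD m r []) c 0)),
            List.foldl
              (fun (t : Int) (cc : Int) =>
                t + ↑(PySem.List.pyGetD st.1 cc []).length -
                  ↑(PySem.List.bisectRight (PySem.List.pyGetD st.1 cc [])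
                      (PySem.List.pyGetD (PySem.List.pyGetD m r []) c 0)))
              st.2 (PySem.List.pyRange 0 (c + 1))))
        st (PySem.List.pyRange 0 (m.length : Int)))
    (fun k st => ∃ rn : Nat, k = (rn : Int) ∧ rn ≤ m.length ∧ pvColsOK m rn 0 st.1 ∧
      st.2 = ((List.range rn).map (fun r =>
        (((List.range m.length).map (fun c => (pvCellB m r c : Int))).sum))).sum)
    0 (m.length : Int) ?ostep
    ((PySem.List.pyRange 0 (m.length : Int) 1).map (fun _ => ([] : List Int)), 0)
    ⟨0, by simp, by simp, pvB_init m, by simp⟩ (by positivity)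
  case ostep =>
    intro k st hk0 hkn hP
    obtain ⟨rn, rfl, hrle, hOK, htot⟩ := hP
    have hrn : rn < m.length := by exact_mod_cast hkn
    -- inner fold over columns
    have Hin := pvFoldInv
      (fun (st : List (List Int) × Int) (c : Int) =>
        (PySem.List.pySetD st.1 c
            (PySem.List.insert (PySem.List.pyGetD st.1 c [])
              (↑(PySem.List.bisectRight (PySem.List.pyGetD st.1 c [])
                  (PySem.List.pyGetD (PySem.List.pyGetD m (rn : Int) []) c 0)))
              (PySem.List.pyGetD (PySem.List.pyGetD m (rn : Int) []) c 0)),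
          List.foldl
            (fun (t : Int) (cc : Int) =>
              t + ↑(PySem.List.pyGetD st.1 cc []).length -
                ↑(PySem.List.bisectRight (PySem.List.pyGetD st.1 cc [])
                    (PySem.List.pyGetD (PySem.List.pyGetD m (rn : Int) []) c 0)))
            st.2 (PySem.List.pyRange 0 (c + 1))))
      (fun k st' => ∃ cn : Nat, k = (cn : Int) ∧ cn ≤ m.length ∧ pvColsOK m rn cn st'.1 ∧
        st'.2 = st.2 + ((List.range cn).map (fun c => (pvCellB m rn c : Int))).sum)
      0 (m.length : Int) ?istep st ⟨0, by simp, by simp, hOK, by simp⟩ (by positivity)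
    obtain ⟨cn, hcn, hcle, hOKn, htotn⟩ := Hin
    have hcnn : cn = m.length := by exact_mod_cast hcn.symm
    subst hcnn
    refine ⟨rn + 1, by push_cast; ring, by omega, pvB_wrap m rn _ hOKn, ?_⟩
    rw [htotn, htot, List.range_succ, List.map_append, List.sum_append]
    simp
    case istep =>
      intro k st' hk0 hkn hQ
      obtain ⟨cn, rfl, hcle, hOKc, htotc⟩ := hQ
      have hcn : cn < m.length := by exact_mod_cast hkn
      have hv : PySem.List.pyGetD (PySem.List.pyGetD m (rn : Int) []) (cn : Int) 0 = pvV m rn cn := by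
        simp [pvV]
      refine ⟨cn + 1, by push_cast; ring, by omega, ?_, ?_⟩
      · show pvColsOK m rn (cn + 1) _
        simp only [hv]
        exact pvB_step m rn cn st'.1 hcn hOKc
      · show List.foldl _ st'.2 _ = _
        simp only [hv]
        rw [pvB_query m rn cn st'.1 hcn hOKc st'.2, htotc, List.range_succ, List.map_append,
          List.sum_append]
        simp [add_assoc]
  obtain ⟨rn, hrn, hrle, hOK, htot⟩ := H
  have : rn = m.length := by exact_mod_cast hrn.symm
  subst this
  rw [htot]

-- ===== VERDICT (by name: the statement is the Claim_ definition above) =====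
theorem get_inversions_spec : Claim_equal_get_inversions := by
  intro m _ _
  unfold Spec_get_inversions
  rw [pvA_eq, pvB_eq]
  simp only [pvCell_eq]
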